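-- pv_equiv track=rewrite | github.com/Keerthan1994/KL-Algorithm | KL Algorithm/KLfinal.py | intcost
-- ===== SOURCE A (Python) =====
-- def intcost(nodes_1, nodes_2, gd):
--     part_cost = 0
--
--     for each_key in gd.keys():
--         for each_node_x in nodes_2:
--             if each_node_x == each_key:
--                 for each_node_y in nodes_1:
--                     if each_node_y in gd[each_key]:
--                         part_cost +=1
--
--     return part_cost
-- ===== SOURCE B (Python) =====
-- def intcost(nodes_1, nodes_2, gd):
--     # inverted index: node value -> list of partition-2 keys whose adjacency list contains it
--     contains = {}
--     for k, vs in gd.items():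
--         for v in set(vs):
--             contains.setdefault(v, []).append(k)
--     count2 = {}
--     for x in nodes_2:
--         count2[x] = count2.get(x, 0) + 1
--     total = 0
--     for y in nodes_1:
--         if y in contains:
--             for k in contains[y]:
--                 total += count2.get(k, 0)
--     return total
-- ===== Notes on version B (the rewrite author's own statement) =====
-- stated objective: faster
-- what changed: Replaces the triple nested scan (keys x nodes_2 x nodes_1 with a membership test) by a prebuilt inverted index node->keys plus a multiplicity counter of nodes_2, then a single pass over nodes_1.
import Mathlib
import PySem

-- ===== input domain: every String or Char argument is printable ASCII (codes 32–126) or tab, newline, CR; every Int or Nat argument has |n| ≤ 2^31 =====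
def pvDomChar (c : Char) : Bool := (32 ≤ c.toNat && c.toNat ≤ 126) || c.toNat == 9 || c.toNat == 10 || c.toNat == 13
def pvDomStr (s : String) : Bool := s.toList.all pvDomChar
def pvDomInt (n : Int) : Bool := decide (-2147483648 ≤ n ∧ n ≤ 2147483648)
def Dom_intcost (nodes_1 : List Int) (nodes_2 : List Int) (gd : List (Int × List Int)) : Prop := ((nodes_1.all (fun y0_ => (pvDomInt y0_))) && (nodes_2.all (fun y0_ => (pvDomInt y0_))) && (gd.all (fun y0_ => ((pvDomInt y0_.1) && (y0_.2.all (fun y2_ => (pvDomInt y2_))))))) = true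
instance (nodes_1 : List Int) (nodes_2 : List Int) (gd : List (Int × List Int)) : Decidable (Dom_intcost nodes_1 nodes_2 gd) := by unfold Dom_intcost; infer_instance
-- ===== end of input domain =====

-- B replaces A's triple nested scan by an inverted index node→keys plus a counter of nodes_2 and one pass over nodes_1.

-- ===== PORT A =====
-- gd[each_key]: each_key comes from gd.keys(), so the lookup always succeeds; getD with default [] is exact here.
def intcost (nodes_1 : List Int) (nodes_2 : List Int) (gd : List (Int × List Int)) : Int :=
  (PySem.Dict.mk gd).keys.foldl (fun part_cost each_key =>
    nodes_2.foldl (fun part_cost each_node_x =>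
      if each_node_x == each_key then
        nodes_1.foldl (fun part_cost each_node_y =>
          if each_node_y ∈ (PySem.Dict.mk gd).getD each_key [] then part_cost + 1 else part_cost)
          part_cost
      else part_cost) part_cost) 0

-- ===== PORT B =====
def intcost_alt (nodes_1 : List Int) (nodes_2 : List Int) (gd : List (Int × List Int)) : Int :=
  let contains := gd.foldl (fun d kv =>
      (PySem.Set.ofList kv.2).foldl (fun d v => d.modify v [] (· ++ [kv.1])) d)
    (PySem.Dict.empty : PySem.Dict Int (List Int))
  let count2 := nodes_2.foldl (fun d x => d.insert x (d.getD x 0 + 1))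
    (PySem.Dict.empty : PySem.Dict Int Int)
  nodes_1.foldl (fun total y =>
    if contains.contains y then
      (contains.getD y []).foldl (fun total k => total + count2.getD k 0) total
    else total) 0

-- ===== PRECONDITION & SPEC =====
-- Pre_: the association list must have pairwise-distinct keys — exactly the lists that represent a
-- Python dict (A's gd IS a dict, so no input A ever receives is excluded).
def Pre_intcost (nodes_1 : List Int) (nodes_2 : List Int) (gd : List (Int × List Int)) : Prop :=
  (gd.map Prod.fst).Nodup
instance (nodes_1 : List Int) (nodes_2 : List Int) (gd : List (Int × List Int)) : Decidable (Pre_intcost nodes_1 nodes_2 gd) := by unfold Pre_intcost; infer_instance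

def pvWitness_intcost : List Int × List Int × (List (Int × List Int)) :=
  ([1, 2], [2, 3], [(2, [1, 3]), (3, [2])])

def Spec_intcost (nodes_1 : List Int) (nodes_2 : List Int) (gd : List (Int × List Int)) (out : Int) : Prop := out = intcost_alt nodes_1 nodes_2 gd
instance (nodes_1 : List Int) (nodes_2 : List Int) (gd : List (Int × List Int)) (out : Int) : Decidable (Spec_intcost nodes_1 nodes_2 gd out) := by unfold Spec_intcost; infer_instance

-- ===== CLAIM (what is proved, stated in full; the proofs are below) =====
def Claim_equal_intcost : Prop := ∀ (nodes_1 : List Int) (nodes_2 : List Int) (gd : List (Int × List Int)), Dom_intcost nodes_1 nodes_2 gd → Pre_intcost nodes_1 nodes_2 gd → Spec_intcost nodes_1 nodes_2 gd (intcost nodes_1 nodes_2 gd)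

-- ===== LEMMAS AND PROOFS =====

-- Σ over a filtered list = Σ of the guarded summand over the full list.
theorem pv_sum_map_filter {α : Type} (l : List α) (p : α → Bool) (f : α → Int) :
    ((l.filter p).map f).sum = (l.map (fun x => if p x then f x else 0)).sum := by
  induction l with
  | nil => rfl
  | cons a t ih => by_cases h : p a <;> simp [h, ih]

-- exchange of the two summations
theorem pv_sum_comm {α β : Type} (l1 : List α) (l2 : List β) (f : α → β → Int) :
    (l1.map (fun a => (l2.map (f a)).sum)).sum
      = (l2.map (fun b => (l1.map (fun a => f a b)).sum)).sum := by
  induction l1 with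
  | nil => simp
  | cons a t ih =>
      simp only [List.map_cons, List.sum_cons, ih]
      rw [PySem.List.sum_map_add_int]

theorem pv_sum_ite_const {α : Type} (l : List α) (p : α → Bool) (c : Int) :
    (l.map (fun x => if p x then c else 0)).sum = (l.countP p : Int) * c := by
  induction l with
  | nil => simp
  | cons a t ih =>
      by_cases h : p a = true
      · simp only [List.map_cons, List.sum_cons, ih, List.countP_cons, h, if_true]
        push_cast; ring
      · simp [h, ih]

-- A's two inner loops: (count of k in nodes_2) times (members of vs among nodes_1).
theorem pv_inner2 (n1 n2 : List Int) (k : Int) (vs : List Int) (a : Int) :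
    n2.foldl (fun pc x =>
        if x == k then
          n1.foldl (fun pc y => if y ∈ vs then pc + 1 else pc) pc
        else pc) a
      = a + (n2.count k : Int) * (n1.countP (fun y => decide (y ∈ vs)) : Int) := by
  induction n2 generalizing a with
  | nil => simp
  | cons x t ih =>
      rw [List.foldl_cons, ih]
      by_cases hx : x = k
      · simp only [hx, beq_self_eq_true, if_true, PySem.List.foldl_ite_add_one,
          List.count_cons_self]
        push_cast; ring
      · simp only [beq_iff_eq, hx, if_false, List.count_cons_of_ne hx]

-- the inverted index at y after one adjacency list (a Nodup list) is folded in
theorem pv_index_inner (s : List Int) (hs : s.Nodup) (k : Int) (d : PySem.Dict Int (List Int)) (y : Int) :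
    (s.foldl (fun d v => d.modify v [] (· ++ [k])) d).getD y []
      = d.getD y [] ++ (if y ∈ s then [k] else []) := by
  induction s generalizing d with
  | nil => simp
  | cons v s ih =>
      simp only [List.nodup_cons] at hs
      simp only [List.foldl_cons, ih hs.2, PySem.Dict.getD_modify, List.mem_cons]
      by_cases hy : y = v
      · simp [hy, hs.1]
      · simp [hy]

-- the inverted index at y over the whole dict
theorem pv_index (gd : List (Int × List Int)) (d : PySem.Dict Int (List Int)) (y : Int) :
    (gd.foldl (fun d kv =>
        (PySem.Set.ofList kv.2).foldl (fun d v => d.modify v [] (· ++ [kv.1])) d) d).getD y []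
      = d.getD y [] ++ (gd.filter (fun kv => decide (y ∈ kv.2))).map Prod.fst := by
  induction gd generalizing d with
  | nil => simp
  | cons kv t ih =>
      simp only [List.foldl_cons, ih, List.filter_cons,
        pv_index_inner _ (PySem.Set.nodup_ofList kv.2) kv.1 d y, PySem.Set.mem_ofList]
      by_cases hy : y ∈ kv.2 <;> simp [hy]

-- the common closed form
theorem pv_A_closed (n1 n2 : List Int) (gd : List (Int × List Int))
    (hpre : (gd.map Prod.fst).Nodup) :
    intcost n1 n2 gd
      = (gd.map (fun kv =>
          (n2.count kv.1 : Int) * (n1.countP (fun y => decide (y ∈ kv.2)) : Int))).sum := by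
  unfold intcost
  simp only [pv_inner2, PySem.List.foldl_add]
  have hkeys : (PySem.Dict.mk gd).keys = gd.map Prod.fst := rfl
  rw [hkeys, List.map_map, zero_add]
  refine congrArg _ (List.map_congr_left ?_)
  intro kv hkv
  have hmem : (kv.1, kv.2) ∈ (PySem.Dict.mk gd).items := by simpa using hkv
  have := PySem.Dict.getD_of_mem_items (d := PySem.Dict.mk gd) hmem (by simpa [hkeys] using hpre) (d0 := [])
  simp [Function.comp, this]

theorem pv_B_closed (n1 n2 : List Int) (gd : List (Int × List Int)) :
    intcost_alt n1 n2 gd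
      = (n1.map (fun y =>
          ((gd.filter (fun kv => decide (y ∈ kv.2))).map
            (fun kv => (n2.count kv.1 : Int))).sum)).sum := by
  unfold intcost_alt
  have hc2 : ∀ k : Int,
      (n2.foldl (fun d x => d.insert x (d.getD x 0 + 1)) (PySem.Dict.empty : PySem.Dict Int Int)).getD k 0
        = (n2.count k : Int) := by
    intro k; rw [PySem.Dict.getD_foldl_insert_add_one]; simp
  have hguard : ∀ (total y : Int),
      (if (gd.foldl (fun d kv => (PySem.Set.ofList kv.2).foldl (fun d v => d.modify v [] (· ++ [kv.1])) d) (PySem.Dict.empty : PySem.Dict Int (List Int))).contains y then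
        ((gd.foldl (fun d kv => (PySem.Set.ofList kv.2).foldl (fun d v => d.modify v [] (· ++ [kv.1])) d) (PySem.Dict.empty : PySem.Dict Int (List Int))).getD y []).foldl
          (fun total k => total + (n2.foldl (fun d x => d.insert x (d.getD x 0 + 1)) (PySem.Dict.empty : PySem.Dict Int Int)).getD k 0) total
      else total)
      = total + (((gd.filter (fun kv => decide (y ∈ kv.2))).map (fun kv => (n2.count kv.1 : Int))).sum) := by
    intro total y
    by_cases h : (gd.foldl (fun d kv => (PySem.Set.ofList kv.2).foldl (fun d v => d.modify v [] (· ++ [kv.1])) d) (PySem.Dict.empty : PySem.Dict Int (List Int))).contains y = true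
    · simp only [h, if_true]
      rw [PySem.List.foldl_add, pv_index]
      simp only [PySem.Dict.getD_empty, List.nil_append, List.map_map]
      refine congrArg _ (congrArg _ (List.map_congr_left ?_))
      intro kv _; simp [Function.comp, hc2]
    · have h' := Bool.of_not_eq_true h
      have h0 : (gd.filter (fun kv => decide (y ∈ kv.2))).map Prod.fst = ([] : List Int) := by
        have hi := pv_index gd PySem.Dict.empty y
        rw [PySem.Dict.getD_of_not_contains _ _ h'] at hi
        simpa using hi.symm
      have hf : gd.filter (fun kv => decide (y ∈ kv.2)) = [] := List.map_eq_nil_iff.mp h0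
      simp [h, hf]
  simp only [hguard]
  rw [PySem.List.foldl_add, zero_add]

-- ===== VERDICT (by name: the statement is the Claim_ definition above) =====
theorem intcost_spec : Claim_equal_intcost := by
  intro n1 n2 gd _ hpre
  show intcost n1 n2 gd = intcost_alt n1 n2 gd
  rw [pv_A_closed n1 n2 gd hpre, pv_B_closed]
  simp only [pv_sum_map_filter]
  rw [pv_sum_comm]
  refine congrArg _ (List.map_congr_left ?_)
  intro kv _
  rw [pv_sum_ite_const]
  ring
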